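-- pv_equiv track=rewrite | github.com/pleavinseven/word_of_the_day_bot | redditbot/mutator.py | nasal
-- ===== SOURCE A (Python) =====
-- def nasal(word):
--     nasal_dict = {"B": "M", "Ch": "Ch", "C": "Ngh", "Dd": "Dd", "D": "N", "G": "Ng",
--                   "P": "Mh", "Th": "Th", "T": "Nh"
--                   }
--     for mutation in nasal_dict:
--         if word.startswith(mutation):
--             mutated_word = nasal_dict[mutation] + word[(len(mutation)):]
--             return mutated_word
--     return word
-- ===== SOURCE B (Python) =====
-- def nasal(word):
--     two = {"Ch": "Ch", "Dd": "Dd", "Th": "Th"}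
--     one = {"B": "M", "C": "Ngh", "D": "N", "G": "Ng", "P": "Mh", "T": "Nh"}
--     head2 = word[:2]
--     if head2 in two:
--         return two[head2] + word[2:]
--     head1 = word[:1]
--     if head1 in one:
--         return one[head1] + word[1:]
--     return word
-- ===== Notes on version B (the rewrite author's own statement) =====
-- stated objective: alternative
-- what changed: Replaced A's ordered linear scan over a nine-rule dict with two slice-keyed lookup tables: word[:2] is tried against the three two-character rules first, then word[:1] against the six one-character rules, reproducing the longest-prefix-first priority without iterating over rules.
import Mathlib
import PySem

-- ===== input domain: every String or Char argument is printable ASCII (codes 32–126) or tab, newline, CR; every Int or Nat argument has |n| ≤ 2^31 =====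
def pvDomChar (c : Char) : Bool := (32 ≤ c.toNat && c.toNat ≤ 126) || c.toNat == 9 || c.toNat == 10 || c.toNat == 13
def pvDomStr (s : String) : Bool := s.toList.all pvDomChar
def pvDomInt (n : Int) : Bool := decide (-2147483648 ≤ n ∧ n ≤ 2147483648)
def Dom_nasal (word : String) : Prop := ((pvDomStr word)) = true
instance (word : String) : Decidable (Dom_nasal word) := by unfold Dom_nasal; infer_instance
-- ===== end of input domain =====

-- B replaces A's ordered linear scan over the nine prefix rules with two lookup
-- tables keyed by word[:2] and word[:1] (two-char rules tried first); objective: alternative.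

-- ===== PORT A =====
-- A's literal dict, as an association list in insertion order
def nasalDict : PySem.Dict String String :=
  PySem.Dict.mk [("B", "M"), ("Ch", "Ch"), ("C", "Ngh"), ("Dd", "Dd"), ("D", "N"),
                 ("G", "Ng"), ("P", "Mh"), ("Th", "Th"), ("T", "Nh")]

-- the 'for mutation in nasal_dict' loop: first key that word starts with wins, else fall through
def nasalLoop (d : PySem.Dict String String) (keys : List String) (word : String) : String :=
  match keys with
  | [] => word
  | m :: rest =>
      if PySem.Str.startswith word m then
        ((d.get? m).getD "") ++ PySem.Str.slice word (some (PySem.Str.len m)) none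
      else nasalLoop d rest word

def nasal (word : String) : String :=
  nasalLoop nasalDict nasalDict.keys word

-- ===== PORT B =====
def nasalTwo : PySem.Dict String String :=
  PySem.Dict.mk [("Ch", "Ch"), ("Dd", "Dd"), ("Th", "Th")]

def nasalOne : PySem.Dict String String :=
  PySem.Dict.mk [("B", "M"), ("C", "Ngh"), ("D", "N"), ("G", "Ng"), ("P", "Mh"), ("T", "Nh")]

def nasal_alt (word : String) : String :=
  match nasalTwo.get? (PySem.Str.slice word none (some 2)) with
  | some r => r ++ PySem.Str.slice word (some 2) none
  | none =>
      match nasalOne.get? (PySem.Str.slice word none (some 1)) with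
      | some r => r ++ PySem.Str.slice word (some 1) none
      | none => word

-- ===== PRECONDITION & SPEC =====
def Spec_nasal (word : String) (out : String) : Prop := out = nasal_alt word
instance (word : String) (out : String) : Decidable (Spec_nasal word out) := by unfold Spec_nasal; infer_instance

-- ===== CLAIM (what is proved, stated in full; the proofs are below) =====
def Claim_equal_nasal : Prop := ∀ (word : String), Dom_nasal word → Spec_nasal word (nasal word)

-- ===== LEMMAS AND PROOFS =====
theorem beq_slice (t : String) (l : List Char) (a b : Option Int) :
    (t == PySem.Str.slice (String.ofList l) a b)
      = (t.toList == PySem.List.slice l a b) := by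
  rw [Bool.eq_iff_iff]
  simp [beq_iff_eq, ← String.toList_inj]

theorem slice_to_lit (l : List Char) (n : Nat) :
    PySem.List.slice l none (some (OfNat.ofNat n : Int)) = l.take n := by
  exact_mod_cast PySem.List.slice_to_natCast l n

theorem nasal_eq_alt (word : String) : nasal word = nasal_alt word := by
  have h : word = String.ofList word.toList := by simp
  rw [h]; generalize word.toList = l
  rcases l with _ | ⟨c, _ | ⟨d, cs⟩⟩ <;>
  · apply String.toList_inj.mp
    simp only [nasal, nasal_alt, nasalDict, nasalTwo, nasalOne,
      PySem.Dict.keys_mk, PySem.Dict.get?_mk_cons, beq_slice]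
    simp [nasalLoop, PySem.Chars.startswith,
      slice_to_lit _ 1, slice_to_lit _ 2, PySem.Dict.get?]
    all_goals split_ifs <;> subst_vars <;> simp_all

-- ===== VERDICT (by name: the statement is the Claim_ definition above) =====
theorem nasal_spec : Claim_equal_nasal := by
  intro word _
  unfold Spec_nasal
  exact nasal_eq_alt word
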